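-- pv_equiv track=rewrite | github.com/facundotorraca/modelos-y-programacion-I | heur.py | _next_slower_attire
-- ===== SOURCE A (Python) =====
-- W_TIME = 1
--
-- WASHED = 3
--
-- INCOMP = 4
--
-- def __get_more_conflictive(attire_1, attire_2):
--     if (attire_1[INCOMP] > attire_2[INCOMP]):
--         return attire_1;
--     return attire_2;
--
-- def _next_slower_attire(attires):
--     slower_attire = None
--
--     #Find the first not washed attire
--     for attire in attires:
--         if not attire[WASHED]:
--             slower_attire = attire
--             break
--
--     '''
--     the conflictives attires (more incompatibilities)
--     need to be add at first, so we have a higher prob-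
--     bability of adding them into a wahing and not on a
--     single attire wash
--     '''
--
--     for attire in attires:
--         if not attire[WASHED]:
--             if attire[W_TIME] == slower_attire[W_TIME]:
--                 slower_attire = __get_more_conflictive(attire, slower_attire)
--             elif attire[W_TIME] > slower_attire[W_TIME]:
--                 slower_attire = attire
--
--     return slower_attire;
-- ===== SOURCE B (Python) =====
-- W_TIME = 1
--
-- WASHED = 3
--
-- INCOMP = 4
--
-- def _next_slower_attire(attires):
--     pending = [a for a in attires if not a[WASHED]]
--     if not pending:
--         return None
--     slowest = max(a[W_TIME] for a in pending)
--     return max((a for a in pending if a[W_TIME] == slowest),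
--                key=lambda a: a[INCOMP])
-- ===== Notes on version B (the rewrite author's own statement) =====
-- stated objective: alternative
-- what changed: Replaced A's single running-max fold (find-first-unwashed seed plus a branching scan with the __get_more_conflictive helper) by a staged computation: filter the unwashed attires, compute the maximum wash time among them, then take the first most-conflictive attire among those attaining it.
-- outside the precondition, e.g. on _next_slower_attire([[0, 5, 0, 0, 7], [0, 9, 0, 0]]): A returns [0, 9, 0, 0], B raises IndexError
import Mathlib
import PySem

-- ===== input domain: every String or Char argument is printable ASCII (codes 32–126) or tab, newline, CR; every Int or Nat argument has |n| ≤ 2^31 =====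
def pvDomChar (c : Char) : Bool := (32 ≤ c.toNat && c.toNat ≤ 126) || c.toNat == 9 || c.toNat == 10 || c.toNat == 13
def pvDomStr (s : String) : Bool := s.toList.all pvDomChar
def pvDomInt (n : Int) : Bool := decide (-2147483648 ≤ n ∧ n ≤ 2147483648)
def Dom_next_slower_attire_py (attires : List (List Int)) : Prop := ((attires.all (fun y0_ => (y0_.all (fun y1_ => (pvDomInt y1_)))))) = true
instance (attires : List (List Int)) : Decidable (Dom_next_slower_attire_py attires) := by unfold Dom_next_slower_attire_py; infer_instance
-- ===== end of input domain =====

-- B replaces A's single running-max fold by a staged computation (filter unwashed, max wash time, first most-conflictive among the ties); same value everywhere inside Pre_.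


-- ===== PORT A =====
-- Python `attire[i]` for the nonnegative literal indices 1/3/4 is exact as pyGetD
-- on the inputs admitted by Pre_ (out-of-range, where Python raises IndexError, is excluded there).
def get_more_conflictive (attire_1 attire_2 : List Int) : List Int :=
  if PySem.List.pyGetD attire_1 4 0 > PySem.List.pyGetD attire_2 4 0 then attire_1 else attire_2

-- one step of A's second loop (state = slower_attire; the `none` state is never hit on an
-- unwashed attire, because the first loop then found one)
def stepA (slower : Option (List Int)) (attire : List Int) : Option (List Int) :=
  if PySem.List.pyGetD attire 3 0 == 0 then
    match slower with
    | none => none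
    | some s =>
      if PySem.List.pyGetD attire 1 0 == PySem.List.pyGetD s 1 0 then
        some (get_more_conflictive attire s)
      else if PySem.List.pyGetD attire 1 0 > PySem.List.pyGetD s 1 0 then some attire
      else some s
  else slower

def next_slower_attire_py (attires : List (List Int)) : Option (List Int) :=
  -- first loop: find the first not washed attire (break)
  let slower_attire := attires.find? (fun a => PySem.List.pyGetD a 3 0 == 0)
  -- second loop
  attires.foldl stepA slower_attire

-- ===== PORT B =====
def next_slower_attire_py_alt (attires : List (List Int)) : Option (List Int) :=
  -- pending = [a for a in attires if not a[WASHED]]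
  let pending := attires.filter (fun a => PySem.List.pyGetD a 3 0 == 0)
  if pending.isEmpty then none
  else
    -- slowest = max(a[W_TIME] for a in pending)
    match PySem.List.max? (pending.map (fun a => PySem.List.pyGetD a 1 0)) (fun x => x) with
    | none => none  -- unreachable: pending is nonempty (totality guard only)
    | some slowest =>
      -- max((a for a in pending if a[W_TIME] == slowest), key=lambda a: a[INCOMP])
      PySem.List.max? (pending.filter (fun a => PySem.List.pyGetD a 1 0 == slowest))
        (fun a => PySem.List.pyGetD a 4 0)

-- ===== PRECONDITION & SPEC =====
-- Pre_ excludes malformed attires (rows missing fields): rows without the WASHED field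
-- (length < 4) and unwashed rows without the INCOMP field (length < 5); there both programs
-- raise IndexError, except that on some such inputs A accidentally returns without ever
-- reading the missing INCOMP field (tie-pattern dependent; see the claim's cites).
def Pre_next_slower_attire_py (attires : List (List Int)) : Prop :=
  ∀ a ∈ attires, 4 ≤ a.length ∧ (a.getD 3 0 = 0 → 5 ≤ a.length)
instance (attires : List (List Int)) : Decidable (Pre_next_slower_attire_py attires) := by
  unfold Pre_next_slower_attire_py; infer_instance

def pvWitness_next_slower_attire_py : List (List Int) := [[9, 2, 7, 1, 1], [8, 3, 6, 0, 2]]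

def Spec_next_slower_attire_py (attires : List (List Int)) (out : Option (List Int)) : Prop := out = next_slower_attire_py_alt attires
instance (attires : List (List Int)) (out : Option (List Int)) : Decidable (Spec_next_slower_attire_py attires out) := by unfold Spec_next_slower_attire_py; infer_instance

-- ===== CLAIM (what is proved, stated in full; the proofs are below) =====
def Claim_equal_next_slower_attire_py : Prop := ∀ (attires : List (List Int)), Dom_next_slower_attire_py attires → Pre_next_slower_attire_py attires → Spec_next_slower_attire_py attires (next_slower_attire_py attires)

-- ===== LEMMAS AND PROOFS =====

-- the wash-time / incompatibility fields, and Python's lexicographic `<` on the key pairs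
def wk (a : List Int) : Int := PySem.List.pyGetD a 1 0
def ik (a : List Int) : Int := PySem.List.pyGetD a 4 0

-- one step of the first-maximal lexicographic running max that A's loop implements
def stepB (best attire : List Int) : List Int :=
  if wk best < wk attire || (wk best == wk attire && ik best < ik attire) then attire else best

-- B's staged computation on an (arbitrary) candidate list
def twoStage (l : List (List Int)) : Option (List Int) :=
  match PySem.List.max? (l.map wk) (fun x => x) with
  | none => none
  | some slowest => PySem.List.max? (l.filter (fun a => wk a == slowest)) ik

lemma stepA_eq_stepB (s a : List Int) (h : (PySem.List.pyGetD a 3 0 == 0) = true) :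
    stepA (some s) a = some (stepB s a) := by
  simp only [stepA, stepB, get_more_conflictive, wk, ik, h, if_pos]
  by_cases h1 : PySem.List.pyGetD a 1 0 = PySem.List.pyGetD s 1 0 <;>
    simp [h1] <;> split_ifs <;> simp_all <;> omega

lemma stepA_skip (s : Option (List Int)) (a : List Int)
    (h : (PySem.List.pyGetD a 3 0 == 0) = false) : stepA s a = s := by
  simp [stepA, h]

lemma stepA_self (a : List Int) (h : (PySem.List.pyGetD a 3 0 == 0) = true) :
    stepA (some a) a = some a := by
  simp [stepA, get_more_conflictive, h]

-- A's fold from a known current best is the first-maximal lexicographic fold over the filtered rest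
lemma foldA_eq_foldB (l : List (List Int)) : ∀ s : List Int,
    l.foldl stepA (some s) =
      some ((l.filter (fun a => PySem.List.pyGetD a 3 0 == 0)).foldl stepB s) := by
  induction l with
  | nil => intro s; rfl
  | cons a t ih =>
    intro s
    by_cases h : (PySem.List.pyGetD a 3 0 == 0) = true
    · simp only [List.foldl_cons, List.filter_cons, h, if_pos,
        stepA_eq_stepB s a h]
      exact ih (stepB s a)
    · simp only [List.foldl_cons, List.filter_cons, Bool.not_eq_true] at *
      simp [h, stepA_skip _ a (by simp [h]), ih s]

-- A's whole program, in the stepB-fold shape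
lemma A_shape (l : List (List Int)) :
    next_slower_attire_py l =
      match l.filter (fun a => PySem.List.pyGetD a 3 0 == 0) with
      | [] => none
      | c :: cs => some (cs.foldl stepB c) := by
  induction l with
  | nil => rfl
  | cons a t ih =>
    by_cases h : (PySem.List.pyGetD a 3 0 == 0) = true
    · simp only [next_slower_attire_py, List.find?_cons, h, List.filter_cons, if_pos,
        List.foldl_cons, stepA_self a h, foldA_eq_foldB]
    · have h' : (PySem.List.pyGetD a 3 0 == 0) = false := by
        cases hb : (PySem.List.pyGetD a 3 0 == 0) <;> simp_all
      simpa only [next_slower_attire_py, List.find?_cons, h', List.filter_cons,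
        Bool.false_eq_true, not_false_eq_true, if_neg, List.foldl_cons,
        stepA_skip _ a h'] using ih

-- dropping the lexicographically smaller (or, on a full tie, later) of the first two
-- candidates does not change the staged result
lemma twoStage_crux (m x : List Int) (p : List (List Int)) :
    twoStage (m :: x :: p) = twoStage (stepB m x :: p) := by
  rcases lt_trichotomy (wk m) (wk x) with hlt | heq | hgt
  · have hs : stepB m x = x := by simp [stepB, hlt]
    have hM := (PySem.List.le_foldl_max (p.map wk) (wk x)).1
    have hne : (wk m == (p.map wk).foldl max (wk x)) = false :=
      beq_eq_false_iff_ne.mpr (by omega)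
    simp only [twoStage, hs, List.map_cons, PySem.List.max?_id_cons, List.foldl_cons,
      max_eq_right hlt.le, List.filter_cons, hne]
    simp
  · have hs : stepB m x = if ik m < ik x then x else m := by
      simp [stepB, heq]
    have hw : wk (stepB m x) = wk m := by rw [hs]; split <;> simp [heq]
    simp only [twoStage, List.map_cons, PySem.List.max?_id_cons, List.foldl_cons,
      hw, ← heq, max_self]
    rw [List.filter_cons, List.filter_cons, List.filter_cons]
    by_cases hqm : wk m = List.foldl max (wk m) (List.map wk p)
    · have hq : (wk m == List.foldl max (wk m) (List.map wk p)) = true :=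
        beq_iff_eq.mpr hqm
      simp only [← heq, hw, hq, if_pos]
      rw [hs]
      simp only [PySem.List.max?, List.foldl_cons]
      split <;> rfl
    · have hq : (wk m == List.foldl max (wk m) (List.map wk p)) = false :=
        beq_eq_false_iff_ne.mpr hqm
      simp only [← heq, hw, hq, Bool.false_eq_true, if_neg, not_false_eq_true]
  · have hs : stepB m x = m := by
      simp [stepB, not_lt.mpr hgt.le, beq_eq_false_iff_ne.mpr hgt.ne']
    have hM := (PySem.List.le_foldl_max (p.map wk) (wk m)).1
    have hne : (wk x == (p.map wk).foldl max (wk m)) = false :=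
      beq_eq_false_iff_ne.mpr (by omega)
    simp only [twoStage, hs, List.map_cons, PySem.List.max?_id_cons, List.foldl_cons,
      max_eq_left hgt.le, List.filter_cons, hne]
    simp

-- the staged computation equals the first-maximal lexicographic fold on a nonempty list
lemma twoStage_eq_fold (p : List (List Int)) : ∀ m : List Int,
    twoStage (m :: p) = some (p.foldl stepB m) := by
  induction p with
  | nil =>
    intro m
    simp [twoStage, PySem.List.max?]
  | cons x t ih =>
    intro m
    rw [twoStage_crux, ih, List.foldl_cons]

lemma main_eq (l : List (List Int)) :
    next_slower_attire_py l = next_slower_attire_py_alt l := by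
  rw [A_shape]
  unfold next_slower_attire_py_alt
  cases h : l.filter (fun a => PySem.List.pyGetD a 3 0 == 0) with
  | nil => simp
  | cons c cs =>
    have := twoStage_eq_fold cs c
    unfold twoStage wk ik at this
    rw [List.map_cons] at this
    exact this.symm

-- ===== VERDICT (by name: the statement is the Claim_ definition above) =====
theorem next_slower_attire_py_spec : Claim_equal_next_slower_attire_py := by
  intro attires _ _
  unfold Spec_next_slower_attire_py
  exact main_eq attires
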